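-- pv_equiv track=rewrite | github.com/qkdk/coding-test | 프로그래머스/2/388353. 지게차와 크레인/지게차와 크레인.py | solution
-- ===== SOURCE A (Python) =====
-- import copy
--
-- vector = [[-1, 0],[0,1],[1,0],[0,-1]]
--
-- def solution(storage, requests):
--     matrix = []
--     for row in storage:
--         matrix.append(list(row))
--
--     for request in requests:
--         if len(request) == 1:
--             matrix = boundary_check(request, matrix)
--         else:
--             remove_all(request[0], matrix)
--
--         # print_matrix(matrix)
--     answer = sum_matrix(matrix)
--     return answer
--
-- def sum_matrix(matrix):
--     count = 0
--     for row in matrix: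
--         for v in row:
--             if v != 0:
--                 count += 1
--     return count
--
-- def remove_all(target, matrix):
--     for y in range(len(matrix)):
--         for x in range(len(matrix[0])):
--             if matrix[y][x] == target:
--                 matrix[y][x] = 0
--
-- def boundary_check(target, matrix):
--     cp_matrix = copy.deepcopy(matrix)
--
--     for y in range(len(matrix)):
--         for x in range(len(matrix[0])):
--             if matrix[y][x] == target:
--                 visited = [[False] * len(matrix[0]) for _ in range(len(matrix))]
--                 visited[y][x] = True
--
--                 result = dfs(y, x, matrix, visited)
--                 if result:
--                     cp_matrix[y][x] = 0
--
--
--     return cp_matrix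
--
-- def dfs(y, x, matrix, visited):
--     result = False
--
--     for d in vector:
--         dy = d[0]
--         dx = d[1]
--
--         ny = y + dy
--         nx = x + dx
--
--         if ny < 0 or nx < 0 or ny >= len(matrix) or nx >= len(matrix[0]):
--             return True
--
--         if visited[ny][nx]:
--             continue
--
--         if matrix[ny][nx] == 0:
--             visited[ny][nx] = True
--             result = result or dfs(ny, nx, matrix, visited)
--
--     return result
-- ===== SOURCE B (Python) =====
-- def solution(storage, requests):
--     # One global fixed-point relaxation per crane request instead of a DFS per target cell.
--     grid = [list(row) for row in storage]
--     h = len(grid)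
--     w = len(grid[0]) if grid else 0
--     for req in requests:
--         t = req[0]
--         if len(req) == 1:
--             ext = exterior(grid, h, w)
--             grid = [[None if grid[y][x] == t and liftable(ext, h, w, y, x) else grid[y][x]
--                      for x in range(w)] for y in range(h)]
--         else:
--             grid = [[None if c == t else c for c in row] for row in grid]
--     return sum(1 for row in grid for v in row if v is not None)
--
--
-- def liftable(ext, h, w, y, x):
--     # reachable by the crane: on the border, or next to an outside-connected empty cell
--     return (y == 0 or x == 0 or y == h - 1 or x == w - 1
--             or (y > 0 and ext[y - 1][x]) or (y + 1 < h and ext[y + 1][x])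
--             or (x > 0 and ext[y][x - 1]) or (x + 1 < w and ext[y][x + 1]))
--
--
-- def exterior(grid, h, w):
--     # mark the empty cells connected to the outside by repeated relaxation to a fixed
--     # point; h*w rounds always suffice, and the loop stops as soon as nothing changes
--     ext = [[False] * w for _ in range(h)]
--     for _ in range(h * w):
--         new = [[grid[y][x] is None and liftable(ext, h, w, y, x)
--                 for x in range(w)] for y in range(h)]
--         if new == ext:
--             break
--         ext = new
--     return ext
-- ===== Notes on version B (the rewrite author's own statement) =====
-- stated objective: alternative
-- what changed: Each crane request now runs ONE global fixed-point relaxation marking the outside-connected empty cells and then a single O(1)-per-cell neighbour test, instead of A's separate recursive DFS (with a fresh visited matrix) from every matching cell; plain removals and the final count become comprehensions.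
-- outside the precondition, e.g. on solution(['ab', 'abc'], ['c!']): A returns 5, B returns 4
import Mathlib
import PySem

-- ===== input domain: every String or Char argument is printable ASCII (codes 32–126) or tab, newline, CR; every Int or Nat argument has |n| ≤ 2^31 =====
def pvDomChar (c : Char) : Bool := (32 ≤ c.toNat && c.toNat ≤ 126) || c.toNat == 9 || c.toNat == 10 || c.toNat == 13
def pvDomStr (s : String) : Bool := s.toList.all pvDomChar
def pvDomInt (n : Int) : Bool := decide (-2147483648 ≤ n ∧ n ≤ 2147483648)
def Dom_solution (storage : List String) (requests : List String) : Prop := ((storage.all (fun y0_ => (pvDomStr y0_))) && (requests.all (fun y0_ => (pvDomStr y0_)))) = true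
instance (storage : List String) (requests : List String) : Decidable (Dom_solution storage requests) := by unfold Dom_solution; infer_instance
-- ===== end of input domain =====

-- B replaces A's per-target recursive DFS (fresh visited matrix per matching cell) by ONE
-- fixed-point relaxation per crane request marking the outside-connected empty cells,
-- followed by an O(1) neighbour test per cell; removals and the count become maps.
-- Cells are `Option Char` (`none` is Python's 0 / None marker for a removed item).

-- ===== PORT A =====
abbrev PvMat := List (List (Option Char))
abbrev PvVis := List (List Bool)

-- xs[y][x] with a default (all reads in both ports are bounds-checked first)
def pvGet2 {α : Type} (d : α) (v : List (List α)) (y x : Nat) : α := (v.getD y []).getD x d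
-- xs[y][x] = a (no-op out of range, like the ports never do)
def pvSet2 {α : Type} (v : List (List α)) (y x : Nat) (a : α) : List (List α) :=
  v.modify y (fun r => r.set x a)

def pvCell (m : PvMat) (y x : Nat) : Option Char := pvGet2 none m y x
def pvCellS (m : PvMat) (y x : Nat) : PvMat := pvSet2 m y x none
def pvVisG (v : PvVis) (y x : Nat) : Bool := pvGet2 false v y x
def pvVisS (v : PvVis) (y x : Nat) : PvVis := pvSet2 v y x true
def pvH (m : PvMat) : Nat := m.length
def pvW (m : PvMat) : Nat := (m.getD 0 []).length
def pvBlank (h w : Nat) : PvVis := List.replicate h (List.replicate w false)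

-- `vector = [[-1,0],[0,1],[1,0],[0,-1]]`
def pvVector : List (Int × Int) := [(-1, 0), (0, 1), (1, 0), (0, -1)]

-- `dfs(y, x, matrix, visited)`: the recursion (pvDfs) and its `for d in vector` loop
-- (pvDfsLoop) with the early `return True`, the `visited` threading and the
-- short-circuit of `result = result or dfs(...)`; fuel only makes it total
-- (each recursive call first marks an unvisited cell, so `h*w+1` fuel never runs out).
mutual
def pvDfs (fuel : Nat) (y x : Nat) (m : PvMat) (v : PvVis) : Bool × PvVis :=
  match fuel with
  | 0 => (false, v)
  | f + 1 => pvDfsLoop f y x m pvVector false v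
  termination_by (fuel, 1)

def pvDfsLoop (f : Nat) (y x : Nat) (m : PvMat) (ds : List (Int × Int)) (res : Bool)
    (v : PvVis) : Bool × PvVis :=
  match ds with
  | [] => (res, v)
  | (dy, dx) :: rest =>
    let ny : Int := (y : Int) + dy
    let nx : Int := (x : Int) + dx
    if ny < 0 || nx < 0 || (pvH m : Int) ≤ ny || (pvW m : Int) ≤ nx then (true, v)
    else
      if pvVisG v ny.toNat nx.toNat then pvDfsLoop f y x m rest res v
      else if pvCell m ny.toNat nx.toNat == none then
        let v' := pvVisS v ny.toNat nx.toNat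
        if res then pvDfsLoop f y x m rest res v'
        else
          let p := pvDfs f ny.toNat nx.toNat m v'
          pvDfsLoop f y x m rest (res || p.1) p.2
      else pvDfsLoop f y x m rest res v
  termination_by (f, 2 * ds.length)
end

-- `boundary_check(target, matrix)`
def pvBoundaryCheck (t : Char) (m : PvMat) : PvMat :=
  (List.range (pvH m)).foldl (fun cp y =>
    (List.range (pvW m)).foldl (fun cp x =>
      if pvCell m y x == some t then
        if (pvDfs (pvH m * pvW m + 1) y x m (pvVisS (pvBlank (pvH m) (pvW m)) y x)).1 then
          pvCellS cp y x
        else cp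
      else cp) cp) m

-- `remove_all(target, matrix)` (in-place writes: the fold reads the current matrix)
def pvRemoveAll (t : Char) (m : PvMat) : PvMat :=
  (List.range m.length).foldl (fun acc y =>
    (List.range (pvW acc)).foldl (fun acc x =>
      if pvCell acc y x == some t then pvCellS acc y x else acc) acc) m

-- `sum_matrix(matrix)`
def pvSumMatrix (m : PvMat) : Int :=
  m.foldl (fun acc row => row.foldl (fun acc v => if v != none then acc + 1 else acc) acc) 0

def solution (storage : List String) (requests : List String) : Int :=
  let m0 : PvMat := storage.map (fun row => row.toList.map (fun c => some c))
  let mf := requests.foldl (fun m req =>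
    match req.toList with
    | [c] => pvBoundaryCheck c m
    | c :: _ => pvRemoveAll c m
    | [] => m) m0           -- Python raises IndexError on an empty request: outside Pre_
  pvSumMatrix mf

-- ===== PORT B =====
-- `liftable(ext, h, w, y, x)`
def pvLiftable (ext : PvVis) (h w y x : Nat) : Bool :=
  y == 0 || x == 0 || y == h - 1 || x == w - 1
    || (decide (0 < y) && pvVisG ext (y - 1) x) || (decide (y + 1 < h) && pvVisG ext (y + 1) x)
    || (decide (0 < x) && pvVisG ext y (x - 1)) || (decide (x + 1 < w) && pvVisG ext y (x + 1))

-- one relaxation round of `exterior`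
def pvStep (g : PvMat) (h w : Nat) (ext : PvVis) : PvVis :=
  (List.range h).map (fun y => (List.range w).map (fun x =>
    pvCell g y x == none && pvLiftable ext h w y x))

-- the `for _ in range(h*w): ... if new == ext: break` loop of `exterior`
def pvExtIter (g : PvMat) (h w : Nat) : Nat → PvVis → PvVis
  | 0, ext => ext
  | k + 1, ext =>
    let n := pvStep g h w ext
    if n == ext then ext else pvExtIter g h w k n

-- `exterior(grid, h, w)`
def pvExterior (g : PvMat) (h w : Nat) : PvVis := pvExtIter g h w (h * w) (pvBlank h w)

def solution_alt (storage : List String) (requests : List String) : Int :=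
  let g0 : PvMat := storage.map (fun row => row.toList.map (fun c => some c))
  let h := g0.length
  let w := (g0.getD 0 []).length
  let gf := requests.foldl (fun g req =>
    match req.toList with
    | [] => g               -- Python raises IndexError on an empty request: outside Pre_
    | t :: rest =>
      if rest.isEmpty then
        let ext := pvExterior g h w
        (List.range h).map (fun y => (List.range w).map (fun x =>
          if pvCell g y x == some t && pvLiftable ext h w y x then none else pvCell g y x))
      else
        g.map (fun row => row.map (fun c => if c == some t then none else c))) g0
  gf.foldl (fun acc row => acc + (row.countP (fun v => v != none) : Int)) 0

-- ===== PRECONDITION & SPEC =====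
-- Pre_ restricts to the task's natural domain: non-empty request strings (A raises
-- IndexError on `request[0]`) and, as soon as there is a request to process, a
-- RECTANGULAR grid (on ragged storage A either raises IndexError — a row shorter than
-- the first — or silently ignores/keeps cells beyond the first row's width).
def Pre_solution (storage : List String) (requests : List String) : Prop :=
  (∀ r ∈ requests, r.toList ≠ []) ∧
    (requests ≠ [] → ∀ s ∈ storage, s.toList.length = (storage.headD "").toList.length)
instance (storage : List String) (requests : List String) :
    Decidable (Pre_solution storage requests) := by unfold Pre_solution; infer_instance

def pvWitness_solution : List String × List String := (["ab", "ba"], ["a", "b!"])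

def Spec_solution (storage : List String) (requests : List String) (out : Int) : Prop :=
  out = solution_alt storage requests
instance (storage : List String) (requests : List String) (out : Int) :
    Decidable (Spec_solution storage requests out) := by unfold Spec_solution; infer_instance

-- ===== CLAIM (what is proved, stated in full; the proofs are below) =====
def Claim_equal_solution : Prop := ∀ (storage : List String) (requests : List String),
  Dom_solution storage requests → Pre_solution storage requests →
    Spec_solution storage requests (solution storage requests)


-- ===== LEMMAS AND PROOFS =====

-- ---- Layer 1: 2-D get/set basics ----

def PvShape {α : Type} (v : List (List α)) (h w : Nat) : Prop :=
  v.length = h ∧ ∀ r ∈ v, r.length = w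

theorem pvGet2_nf {α : Type} (d : α) (v : List (List α)) (y x : Nat) :
    pvGet2 d v y x = ((v[y]?.getD [])[x]?).getD d := by
  rw [pvGet2, List.getD_eq_getElem?_getD (l := v), List.getD_eq_getElem?_getD]

theorem pvGet2_cons_zero {α : Type} (d : α) (r : List α) (rs : List (List α)) (x : Nat) :
    pvGet2 d (r :: rs) 0 x = r.getD x d := rfl

theorem pvGet2_cons_succ {α : Type} (d : α) (r : List α) (rs : List (List α)) (n x : Nat) :
    pvGet2 d (r :: rs) (n + 1) x = pvGet2 d rs n x := rfl

theorem pvShape_rowlen {α : Type} {v : List (List α)} {h w y : Nat}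
    (hs : PvShape v h w) (hy : y < h) : (v.getD y []).length = w := by
  have hy' : y < v.length := by have := hs.1; omega
  rw [List.getD_eq_getElem?_getD, List.getElem?_eq_getElem hy', Option.getD_some]
  exact hs.2 _ (List.getElem_mem hy')

theorem pvShape_set2 {α : Type} {v : List (List α)} {h w : Nat} (y x : Nat) (a : α)
    (hs : PvShape v h w) : PvShape (pvSet2 v y x a) h w := by
  obtain ⟨hl, hr⟩ := hs
  refine ⟨by simp [pvSet2, hl], ?_⟩
  intro r hrmem
  rw [pvSet2, List.modify_eq_set_getElem?] at hrmem
  rcases hget : v[y]? with _ | row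
  · rw [hget] at hrmem; simpa using hr r hrmem
  · rw [hget] at hrmem
    simp at hrmem
    rcases List.mem_or_eq_of_mem_set hrmem with hmem | heq
    · exact hr r hmem
    · subst heq
      rw [List.length_set]
      exact hr _ (List.mem_of_getElem? hget)

theorem pvGet2_set2_self {α : Type} (d : α) {v : List (List α)} {y x : Nat} (a : α)
    (hy : y < v.length) (hx : x < (v.getD y []).length) :
    pvGet2 d (pvSet2 v y x a) y x = a := by
  rw [pvGet2_nf, pvSet2, List.getElem?_modify, List.getElem?_eq_getElem hy]
  have hx' : x < v[y].length := by
    rw [List.getD_eq_getElem?_getD, List.getElem?_eq_getElem hy, Option.getD_some] at hx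
    exact hx
  simp [List.getElem?_set, hx']

theorem pvGet2_set2_ne {α : Type} (d : α) {v : List (List α)} {y x p q : Nat} (a : α)
    (hne : ¬(y = p ∧ x = q)) : pvGet2 d (pvSet2 v y x a) p q = pvGet2 d v p q := by
  rw [pvGet2_nf, pvGet2_nf, pvSet2, List.getElem?_modify]
  by_cases hyp : y = p
  · subst hyp
    rcases hget : v[y]? with _ | row
    · rfl
    · have hxq : ¬ x = q := fun hq => hne ⟨rfl, hq⟩
      simp [List.getElem?_set, hxq]
  · simp only [if_neg hyp]
    rcases hget : v[p]? with _ | row <;> rfl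

theorem pvVisG_set_mono {v : PvVis} {y x p q : Nat}
    (hv : pvVisG v p q = true) : pvVisG (pvVisS v y x) p q = true := by
  by_cases hpq : y = p ∧ x = q
  · obtain ⟨rfl, rfl⟩ := hpq
    have hy : y < v.length := by
      by_contra hcon
      rw [pvVisG, pvGet2_nf, List.getElem?_eq_none (l := v) (by omega)] at hv
      simp at hv
    have hx : x < (v.getD y []).length := by
      rw [List.getD_eq_getElem?_getD]
      by_contra hcon
      push_neg at hcon
      rw [pvVisG, pvGet2_nf, List.getElem?_eq_none hcon] at hv
      simp at hv
    rw [pvVisS, pvVisG, pvGet2_set2_self _ _ hy hx]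
  · rw [pvVisS, pvVisG, pvGet2_set2_ne _ _ hpq]
    exact hv

theorem pvCellS_get_self {cp : PvMat} {a b : Nat} (h1 : a < cp.length)
    (h2 : b < (cp.getD a []).length) : pvCell (pvCellS cp a b) a b = none :=
  pvGet2_set2_self none none h1 h2

theorem pvCellS_get_ne {cp : PvMat} {y x p q : Nat} (hne : ¬ (y = p ∧ x = q)) :
    pvCell (pvCellS cp y x) p q = pvCell cp p q :=
  pvGet2_set2_ne none none hne

-- ---- Layer 2: the unvisited-cell counter ----

def pvUnvis (v : PvVis) : Nat := (v.map (fun r => r.count false)).sum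

theorem pvUnvis_cons (r : List Bool) (rs : PvVis) :
    pvUnvis (r :: rs) = r.count false + pvUnvis rs := by
  simp [pvUnvis]

theorem pvUnvis_set_le (v : PvVis) (y x : Nat) : pvUnvis (pvVisS v y x) ≤ pvUnvis v := by
  induction v generalizing y with
  | nil => simp [pvVisS, pvSet2, pvUnvis]
  | cons r rs ih =>
    cases y with
    | zero =>
      rw [pvVisS, pvSet2, List.modify_zero_cons, pvUnvis_cons, pvUnvis_cons]
      rcases Nat.lt_or_ge x r.length with hx | hx
      · have : List.count false (r.set x true) ≤ List.count false r := by
          simp only [List.count_set hx, show ((true : Bool) == false) = false from rfl,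
            Bool.false_eq_true, if_false]
          split_ifs <;> omega
        omega
      · rw [List.set_eq_of_length_le hx]
    | succ n =>
      rw [pvVisS, pvSet2, List.modify_succ_cons, pvUnvis_cons, pvUnvis_cons]
      have := ih n
      rw [pvVisS, pvSet2] at this
      omega

theorem pvUnvis_set_true {v : PvVis} {h w y x : Nat} (hs : PvShape v h w)
    (hy : y < h) (hx : x < w) (hf : pvVisG v y x = false) :
    pvUnvis (pvVisS v y x) + 1 = pvUnvis v := by
  induction v generalizing y h with
  | nil => exfalso; have h0 := hs.1; simp at h0; omega
  | cons r rs ih =>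
    cases y with
    | zero =>
      have hxr : x < r.length := by
        have := hs.2 r (by simp); omega
      have hrx : r[x] = false := by
        rw [pvVisG, pvGet2_cons_zero, List.getD_eq_getElem?_getD,
          List.getElem?_eq_getElem hxr, Option.getD_some] at hf
        exact hf
      rw [pvVisS, pvSet2, List.modify_zero_cons, pvUnvis_cons, pvUnvis_cons]
      have hpos : 0 < List.count false r :=
        List.count_pos_iff.mpr (hrx ▸ List.getElem_mem hxr)
      have hcs : List.count false (r.set x true) + 1 = List.count false r := by
        simp only [List.count_set hxr, hrx, show ((true : Bool) == false) = false from rfl,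
          show ((false : Bool) == false) = true from rfl, Bool.false_eq_true, if_false, if_true]
        omega
      omega
    | succ n =>
      cases h with
      | zero => omega
      | succ h' =>
        have hf' : pvVisG rs n x = false := by
          rw [pvVisG, pvGet2_cons_succ] at hf
          exact hf
        have hsh : PvShape rs h' w :=
          ⟨by have := hs.1; simpa using this, fun r hm => hs.2 r (by simp [hm])⟩
        have := ih hsh (by omega) hf'
        rw [pvVisS, pvSet2, List.modify_succ_cons, pvUnvis_cons, pvUnvis_cons]
        rw [pvVisS, pvSet2] at this
        omega

theorem pvShape_blank (h w : Nat) : PvShape (pvBlank h w) h w := by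
  constructor
  · simp [pvBlank]
  · intro r hr
    rw [pvBlank] at hr
    rw [List.eq_of_mem_replicate hr]
    simp

theorem pvVisG_blank (h w y x : Nat) : pvVisG (pvBlank h w) y x = false := by
  rw [pvVisG, pvGet2_nf, pvBlank, List.getElem?_replicate]
  split_ifs with hy
  · rw [Option.getD_some, List.getElem?_replicate]
    split_ifs <;> rfl
  · rfl

theorem pvUnvis_blank (h w : Nat) : pvUnvis (pvBlank h w) = h * w := by
  simp [pvUnvis, pvBlank, List.map_replicate, List.count_replicate, Nat.mul_comm]


-- ---- Layer 3: the reachability specification both programs compute ----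

def PvBorder (h w y x : Nat) : Prop := y = 0 ∨ x = 0 ∨ y = h - 1 ∨ x = w - 1

def PvAdj (y x p q : Nat) : Prop :=
  (q = x ∧ (p + 1 = y ∨ p = y + 1)) ∨ (p = y ∧ (q + 1 = x ∨ q = x + 1))

-- "within n steps": the item cell itself on the border, or an adjacent chain of empty
-- in-range cells of length ≤ n ending on the border
def PvAcc (m : PvMat) (h w : Nat) : Nat → Nat → Nat → Prop
  | 0, y, x => PvBorder h w y x
  | n + 1, y, x => PvBorder h w y x ∨ ∃ p q, p < h ∧ q < w ∧ PvAdj y x p q ∧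
      pvCell m p q = none ∧ PvAcc m h w n p q

theorem pvAcc_succ {m : PvMat} {h w n y x : Nat} (ha : PvAcc m h w n y x) :
    PvAcc m h w (n + 1) y x := by
  induction n generalizing y x with
  | zero => exact Or.inl ha
  | succ k ih =>
    rcases ha with hb | ⟨p, q, hp, hq, hadj, hc, hacc⟩
    · exact Or.inl hb
    · exact Or.inr ⟨p, q, hp, hq, hadj, hc, ih hacc⟩

theorem pvAcc_mono {m : PvMat} {h w n n' y x : Nat} (hle : n ≤ n')
    (ha : PvAcc m h w n y x) : PvAcc m h w n' y x := by
  induction n' with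
  | zero => have : n = 0 := by omega
            subst this; exact ha
  | succ k ih =>
    rcases Nat.lt_or_ge n (k + 1) with hlt | hge
    · exact pvAcc_succ (ih (by omega))
    · have : n = k + 1 := by omega
      subst this; exact ha

-- the out-of-range test of A's dfs, as a proposition on a direction
def PvOOR (h w y x : Nat) (d : Int × Int) : Prop :=
  (y : Int) + d.1 < 0 ∨ (x : Int) + d.2 < 0 ∨ (h : Int) ≤ (y : Int) + d.1 ∨
    (w : Int) ≤ (x : Int) + d.2

theorem pvOOR_iff_border {h w y x : Nat} (hy : y < h) (hx : x < w) :
    (∃ d ∈ pvVector, PvOOR h w y x d) ↔ PvBorder h w y x := by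
  constructor
  · rintro ⟨d, hd, hoor⟩
    simp only [pvVector, List.mem_cons, List.not_mem_nil, or_false] at hd
    rcases hd with rfl | rfl | rfl | rfl
      <;> simp only [PvOOR, PvBorder] at *
      <;> norm_num at hoor ⊢ <;> omega
  · intro hb
    rcases hb with h0 | h0 | h0 | h0
    · exact ⟨(-1, 0), by simp [pvVector], by simp [PvOOR]; omega⟩
    · exact ⟨(0, -1), by simp [pvVector], by simp [PvOOR]; omega⟩
    · exact ⟨(1, 0), by simp [pvVector], by simp [PvOOR]; omega⟩
    · exact ⟨(0, 1), by simp [pvVector], by simp [PvOOR]; omega⟩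

theorem pvDir_inrange {h w y x : Nat} {d : Int × Int} (hy : y < h) (hx : x < w)
    (hd : d ∈ pvVector) (hno : ¬ PvOOR h w y x d) :
    ((y : Int) + d.1).toNat < h ∧ ((x : Int) + d.2).toNat < w ∧
      PvAdj y x ((y : Int) + d.1).toNat ((x : Int) + d.2).toNat := by
  simp only [pvVector, List.mem_cons, List.not_mem_nil, or_false] at hd
  rcases hd with rfl | rfl | rfl | rfl
    <;> simp only [PvOOR, PvAdj, not_or, not_lt, not_le] at *
    <;> norm_num at hno ⊢ <;> omega

theorem pvAdj_complete {h w y x p q : Nat} (hy : y < h) (hx : x < w) (hp : p < h)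
    (hq : q < w) (hadj : PvAdj y x p q) :
    ∃ d ∈ pvVector, ¬ PvOOR h w y x d ∧ ((y : Int) + d.1).toNat = p ∧
      ((x : Int) + d.2).toNat = q := by
  rcases hadj with ⟨rfl, hcase | hcase⟩ | ⟨rfl, hcase | hcase⟩
  · exact ⟨(-1, 0), by simp [pvVector], by simp [PvOOR]; omega, by omega, by omega⟩
  · exact ⟨(1, 0), by simp [pvVector], by simp [PvOOR]; omega, by omega, by omega⟩
  · exact ⟨(0, -1), by simp [pvVector], by simp [PvOOR]; omega, by omega, by omega⟩
  · exact ⟨(0, 1), by simp [pvVector], by simp [PvOOR]; omega, by omega, by omega⟩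


-- ---- Layer 4: characterizing A's recursive dfs ----

-- facts preserved by every dfs/loop call: shape, already-visited cells, the counter
def PvQ (v v' : PvVis) : Prop :=
  (∀ h w, PvShape v h w → PvShape v' h w) ∧
  (∀ a b, pvVisG v a b = true → pvVisG v' a b = true) ∧ pvUnvis v' ≤ pvUnvis v

theorem pvQ_refl (v : PvVis) : PvQ v v := ⟨fun _ _ hs => hs, fun _ _ hv => hv, le_refl _⟩

theorem pvQ_trans {u v w : PvVis} (h1 : PvQ u v) (h2 : PvQ v w) : PvQ u w :=
  ⟨fun a b hs => h2.1 a b (h1.1 a b hs), fun a b hv => h2.2.1 a b (h1.2.1 a b hv),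
    le_trans h2.2.2 h1.2.2⟩

theorem pvQ_set (v : PvVis) (y x : Nat) : PvQ v (pvVisS v y x) :=
  ⟨fun _ _ hs => pvShape_set2 y x true hs, fun _ _ hv => pvVisG_set_mono hv,
    pvUnvis_set_le v y x⟩

-- the port's out-of-range test is PvOOR
theorem pvOOR_decide (m : PvMat) (y x : Nat) (dy dx : Int) :
    ((decide ((y : Int) + dy < 0) || decide ((x : Int) + dx < 0) ||
      decide ((pvH m : Int) ≤ (y : Int) + dy) || decide ((pvW m : Int) ≤ (x : Int) + dx)) = true)
      ↔ PvOOR (pvH m) (pvW m) y x (dy, dx) := by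
  simp [PvOOR, or_assoc]

theorem pvOOR_decide_false {m : PvMat} {y x : Nat} {dy dx : Int}
    (hc : ¬ PvOOR (pvH m) (pvW m) y x (dy, dx)) :
    ((decide ((y : Int) + dy < 0) || decide ((x : Int) + dx < 0) ||
      decide ((pvH m : Int) ≤ (y : Int) + dy) || decide ((pvW m : Int) ≤ (x : Int) + dx)) = false) := by
  rcases hh : (decide ((y : Int) + dy < 0) || decide ((x : Int) + dx < 0) ||
      decide ((pvH m : Int) ≤ (y : Int) + dy) || decide ((pvW m : Int) ≤ (x : Int) + dx)) with _ | _
  · rfl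
  · exact absurd ((pvOOR_decide m y x dy dx).mp hh) hc

-- one equation per branch of the `for d in vector` loop body
theorem pvLoopEq_nil (f y x : Nat) (m : PvMat) (res : Bool) (v : PvVis) :
    pvDfsLoop f y x m [] res v = (res, v) := by
  simp [pvDfsLoop]

theorem pvLoopEq_oor (f y x : Nat) (m : PvMat) {dy dx : Int} (rest : List (Int × Int))
    (res : Bool) (v : PvVis) (hc : PvOOR (pvH m) (pvW m) y x (dy, dx)) :
    pvDfsLoop f y x m ((dy, dx) :: rest) res v = (true, v) := by
  have hb := (pvOOR_decide m y x dy dx).mpr hc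
  simp only [pvDfsLoop]
  simp [hb]

theorem pvLoopEq_vis (f y x : Nat) (m : PvMat) {dy dx : Int} (rest : List (Int × Int))
    (res : Bool) (v : PvVis) (hc : ¬ PvOOR (pvH m) (pvW m) y x (dy, dx))
    (h2 : pvVisG v ((y : Int) + dy).toNat ((x : Int) + dx).toNat = true) :
    pvDfsLoop f y x m ((dy, dx) :: rest) res v = pvDfsLoop f y x m rest res v := by
  simp only [pvDfsLoop]
  simp [pvOOR_decide_false hc, h2]

theorem pvLoopEq_emptyT (f y x : Nat) (m : PvMat) {dy dx : Int} (rest : List (Int × Int))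
    (v : PvVis) (hc : ¬ PvOOR (pvH m) (pvW m) y x (dy, dx))
    (h2 : pvVisG v ((y : Int) + dy).toNat ((x : Int) + dx).toNat = false)
    (h3 : pvCell m ((y : Int) + dy).toNat ((x : Int) + dx).toNat = none) :
    pvDfsLoop f y x m ((dy, dx) :: rest) true v =
      pvDfsLoop f y x m rest true (pvVisS v ((y : Int) + dy).toNat ((x : Int) + dx).toNat) := by
  simp only [pvDfsLoop]
  simp [pvOOR_decide_false hc, h2, h3]

theorem pvLoopEq_emptyF (f y x : Nat) (m : PvMat) {dy dx : Int} (rest : List (Int × Int))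
    (v : PvVis) (hc : ¬ PvOOR (pvH m) (pvW m) y x (dy, dx))
    (h2 : pvVisG v ((y : Int) + dy).toNat ((x : Int) + dx).toNat = false)
    (h3 : pvCell m ((y : Int) + dy).toNat ((x : Int) + dx).toNat = none) :
    pvDfsLoop f y x m ((dy, dx) :: rest) false v =
      pvDfsLoop f y x m rest
        (pvDfs f ((y : Int) + dy).toNat ((x : Int) + dx).toNat m
          (pvVisS v ((y : Int) + dy).toNat ((x : Int) + dx).toNat)).1
        (pvDfs f ((y : Int) + dy).toNat ((x : Int) + dx).toNat m
          (pvVisS v ((y : Int) + dy).toNat ((x : Int) + dx).toNat)).2 := by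
  simp only [pvDfsLoop]
  simp [pvOOR_decide_false hc, h2, h3]

theorem pvLoopEq_occ (f y x : Nat) (m : PvMat) {dy dx : Int} (rest : List (Int × Int))
    (res : Bool) (v : PvVis) (hc : ¬ PvOOR (pvH m) (pvW m) y x (dy, dx))
    (h2 : pvVisG v ((y : Int) + dy).toNat ((x : Int) + dx).toNat = false)
    (h3 : pvCell m ((y : Int) + dy).toNat ((x : Int) + dx).toNat ≠ none) :
    pvDfsLoop f y x m ((dy, dx) :: rest) res v = pvDfsLoop f y x m rest res v := by
  simp only [pvDfsLoop]
  simp [pvOOR_decide_false hc, h2, h3]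

theorem pvDfs_zero (y x : Nat) (m : PvMat) (v : PvVis) : pvDfs 0 y x m v = (false, v) := by
  simp [pvDfs]

theorem pvDfs_succ (f y x : Nat) (m : PvMat) (v : PvVis) :
    pvDfs (f + 1) y x m v = pvDfsLoop f y x m pvVector false v := by
  simp [pvDfs]

theorem pvDfsLoop_Q (f y x : Nat) (m : PvMat)
    (IH : ∀ p q v, PvQ v (pvDfs f p q m v).2) :
    ∀ ds res v, PvQ v (pvDfsLoop f y x m ds res v).2 := by
  intro ds
  induction ds with
  | nil => intro res v; rw [pvLoopEq_nil]; exact pvQ_refl v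
  | cons d rest ih =>
    intro res v
    obtain ⟨dy, dx⟩ := d
    by_cases hc : PvOOR (pvH m) (pvW m) y x (dy, dx)
    · rw [pvLoopEq_oor f y x m rest res v hc]; exact pvQ_refl v
    rcases h2 : pvVisG v ((y : Int) + dy).toNat ((x : Int) + dx).toNat with _ | _
    · by_cases h3 : pvCell m ((y : Int) + dy).toNat ((x : Int) + dx).toNat = none
      · rcases res with _ | _
        · rw [pvLoopEq_emptyF f y x m rest v hc h2 h3]
          exact pvQ_trans (pvQ_set v _ _) (pvQ_trans (IH _ _ _) (ih _ _))
        · rw [pvLoopEq_emptyT f y x m rest v hc h2 h3]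
          exact pvQ_trans (pvQ_set v _ _) (ih _ _)
      · rw [pvLoopEq_occ f y x m rest res v hc h2 h3]; exact ih res v
    · rw [pvLoopEq_vis f y x m rest res v hc h2]; exact ih res v

theorem pvDfs_Q : ∀ (fuel p q : Nat) (m : PvMat) (v : PvVis),
    PvQ v (pvDfs fuel p q m v).2 := by
  intro fuel
  induction fuel with
  | zero => intro p q m v; rw [pvDfs_zero]; exact pvQ_refl v
  | succ f ih =>
    intro p q m v
    rw [pvDfs_succ]
    exact pvDfsLoop_Q f p q m (fun p' q' v' => ih p' q' m v') pvVector false v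

theorem pvDfsLoop_res_true (f y x : Nat) (m : PvMat) :
    ∀ ds v, (pvDfsLoop f y x m ds true v).1 = true := by
  intro ds
  induction ds with
  | nil => intro v; rw [pvLoopEq_nil]
  | cons d rest ih =>
    intro v
    obtain ⟨dy, dx⟩ := d
    by_cases hc : PvOOR (pvH m) (pvW m) y x (dy, dx)
    · rw [pvLoopEq_oor f y x m rest true v hc]
    rcases h2 : pvVisG v ((y : Int) + dy).toNat ((x : Int) + dx).toNat with _ | _
    · by_cases h3 : pvCell m ((y : Int) + dy).toNat ((x : Int) + dx).toNat = none
      · rw [pvLoopEq_emptyT f y x m rest v hc h2 h3]; exact ih _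
      · rw [pvLoopEq_occ f y x m rest true v hc h2 h3]; exact ih _
    · rw [pvLoopEq_vis f y x m rest true v hc h2]; exact ih _

-- soundness: a `true` answer exhibits reachability bounded by the unvisited count
theorem pvDfsLoop_true {m : PvMat} (f y x : Nat)
    (hy : y < pvH m) (hx : x < pvW m)
    (IH : ∀ p q v, p < pvH m → q < pvW m → PvShape v (pvH m) (pvW m) →
      (pvDfs f p q m v).1 = true →
      ∃ n, n ≤ pvUnvis v ∧ PvAcc m (pvH m) (pvW m) n p q) :
    ∀ ds res v, (∀ d ∈ ds, d ∈ pvVector) → PvShape v (pvH m) (pvW m) →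
      (pvDfsLoop f y x m ds res v).1 = true →
      res = true ∨ ∃ n, n ≤ pvUnvis v ∧ PvAcc m (pvH m) (pvW m) n y x := by
  intro ds
  induction ds with
  | nil =>
    intro res v _ _ hres
    rw [pvLoopEq_nil] at hres
    exact Or.inl hres
  | cons d rest ih =>
    intro res v hmem hv htrue
    obtain ⟨dy, dx⟩ := d
    have hdmem : (dy, dx) ∈ pvVector := hmem _ (by simp)
    have hrest : ∀ d ∈ rest, d ∈ pvVector := fun d hd => hmem d (by simp [hd])
    by_cases hres : res = true
    · exact Or.inl hres
    have hresf : res = false := by cases res <;> simp_all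
    subst hresf
    by_cases hc : PvOOR (pvH m) (pvW m) y x (dy, dx)
    · refine Or.inr ⟨0, Nat.zero_le _, ?_⟩
      exact (pvOOR_iff_border hy hx).mp ⟨(dy, dx), hdmem, hc⟩
    rcases h2 : pvVisG v ((y : Int) + dy).toNat ((x : Int) + dx).toNat with _ | _
    · by_cases h3 : pvCell m ((y : Int) + dy).toNat ((x : Int) + dx).toNat = none
      · rw [pvLoopEq_emptyF f y x m rest v hc h2 h3] at htrue
        obtain ⟨hnyh, hnxw, hadj⟩ := pvDir_inrange hy hx hdmem hc
        set ny := ((y : Int) + dy).toNat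
        set nx := ((x : Int) + dx).toNat
        have hv2 : PvShape (pvVisS v ny nx) (pvH m) (pvW m) := pvShape_set2 _ _ _ hv
        have hunv : pvUnvis (pvVisS v ny nx) + 1 = pvUnvis v :=
          pvUnvis_set_true hv hnyh hnxw h2
        by_cases hb1 : (pvDfs f ny nx m (pvVisS v ny nx)).1 = true
        · obtain ⟨n, hn, hacc⟩ := IH ny nx (pvVisS v ny nx) hnyh hnxw hv2 hb1
          exact Or.inr ⟨n + 1, by omega, Or.inr ⟨ny, nx, hnyh, hnxw, hadj, h3, hacc⟩⟩
        · have hb1f : (pvDfs f ny nx m (pvVisS v ny nx)).1 = false := by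
            cases hh : (pvDfs f ny nx m (pvVisS v ny nx)).1 <;> simp_all
          rw [hb1f] at htrue
          have hv3 : PvShape (pvDfs f ny nx m (pvVisS v ny nx)).2 (pvH m) (pvW m) :=
            (pvDfs_Q f ny nx m (pvVisS v ny nx)).1 _ _ hv2
          have hun3 : pvUnvis (pvDfs f ny nx m (pvVisS v ny nx)).2 ≤ pvUnvis (pvVisS v ny nx) :=
            (pvDfs_Q f ny nx m (pvVisS v ny nx)).2.2
          rcases ih false _ hrest hv3 htrue with hcontra | ⟨n, hn, hacc⟩
          · exact absurd hcontra (by simp)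
          · exact Or.inr ⟨n, by omega, hacc⟩
      · rw [pvLoopEq_occ f y x m rest false v hc h2 h3] at htrue
        exact ih false v hrest hv htrue
    · rw [pvLoopEq_vis f y x m rest false v hc h2] at htrue
      exact ih false v hrest hv htrue

theorem pvDfs_true {m : PvMat} :
    ∀ (fuel p q : Nat) (v : PvVis), p < pvH m → q < pvW m →
      PvShape v (pvH m) (pvW m) → (pvDfs fuel p q m v).1 = true →
      ∃ n, n ≤ pvUnvis v ∧ PvAcc m (pvH m) (pvW m) n p q := by
  intro fuel
  induction fuel with
  | zero => intro p q v _ _ _ hfalse; rw [pvDfs_zero] at hfalse; simp at hfalse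
  | succ f ih =>
    intro p q v hp hq hv htrue
    rw [pvDfs_succ] at htrue
    rcases pvDfsLoop_true f p q hp hq (fun p' q' v' => ih p' q' v') pvVector false v
        (fun d hd => hd) hv htrue with hcontra | hgood
    · exact absurd hcontra (by simp)
    · exact hgood

-- completeness: a `false` answer closes off every escape
def PvClosed (m : PvMat) (v₀ v' : PvVis) : Prop :=
  ∀ a b, a < pvH m → b < pvW m → pvVisG v₀ a b = false → pvVisG v' a b = true →
    pvCell m a b = none ∧ ¬ PvBorder (pvH m) (pvW m) a b ∧
    ∀ p q, p < pvH m → q < pvW m → PvAdj a b p q → pvCell m p q = none →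
      pvVisG v' p q = true

theorem pvClosed_trans {m : PvMat} {v1 v2 v3 : PvVis} (h12 : PvClosed m v1 v2)
    (h23 : PvClosed m v2 v3) (hle : ∀ a b, pvVisG v2 a b = true → pvVisG v3 a b = true) :
    PvClosed m v1 v3 := by
  intro a b ha hb h0 h3
  by_cases h2 : pvVisG v2 a b = true
  · obtain ⟨hcell, hnb, hnbr⟩ := h12 a b ha hb h0 h2
    exact ⟨hcell, hnb, fun p q hp hq hadj hc => hle p q (hnbr p q hp hq hadj hc)⟩
  · have h2f : pvVisG v2 a b = false := by cases hh : pvVisG v2 a b <;> simp_all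
    exact h23 a b ha hb h2f h3

theorem pvDfsLoop_false {m : PvMat} (f y x : Nat)
    (hy : y < pvH m) (hx : x < pvW m)
    (IH : ∀ p q v v', p < pvH m → q < pvW m → PvShape v (pvH m) (pvW m) →
      pvUnvis v + 1 ≤ f → pvDfs f p q m v = (false, v') →
      ¬ PvBorder (pvH m) (pvW m) p q ∧
      (∀ c e, c < pvH m → e < pvW m → PvAdj p q c e → pvCell m c e = none →
        pvVisG v' c e = true) ∧ PvClosed m v v') :
    ∀ ds res v v', (∀ d ∈ ds, d ∈ pvVector) → PvShape v (pvH m) (pvW m) →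
      pvUnvis v + 1 ≤ f + 1 → pvDfsLoop f y x m ds res v = (false, v') →
      (∀ d ∈ ds, ¬ PvOOR (pvH m) (pvW m) y x d) ∧
      (∀ d ∈ ds, ¬ PvOOR (pvH m) (pvW m) y x d →
        pvCell m ((y : Int) + d.1).toNat ((x : Int) + d.2).toNat = none →
        pvVisG v' ((y : Int) + d.1).toNat ((x : Int) + d.2).toNat = true) ∧
      PvClosed m v v' := by
  intro ds
  induction ds with
  | nil =>
    intro res v v' _ _ _ hret
    rw [pvLoopEq_nil] at hret
    injection hret with hr1 hr2
    subst hr2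
    refine ⟨by simp, by simp, ?_⟩
    intro a b _ _ h0 h1
    rw [h0] at h1; exact absurd h1 (by simp)
  | cons d rest ih =>
    intro res v v' hmem hv hfuel hret
    obtain ⟨dy, dx⟩ := d
    have hdmem : (dy, dx) ∈ pvVector := hmem _ (by simp)
    have hrest : ∀ d ∈ rest, d ∈ pvVector := fun d hd => hmem d (by simp [hd])
    by_cases hc : PvOOR (pvH m) (pvW m) y x (dy, dx)
    · rw [pvLoopEq_oor f y x m rest res v hc] at hret
      exact absurd (congrArg Prod.fst hret) (by simp)
    rcases h2 : pvVisG v ((y : Int) + dy).toNat ((x : Int) + dx).toNat with _ | _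
    · by_cases h3 : pvCell m ((y : Int) + dy).toNat ((x : Int) + dx).toNat = none
      · -- unvisited empty neighbour: res must be false, the call must answer false
        obtain ⟨hnyh, hnxw, hadj⟩ := pvDir_inrange hy hx hdmem hc
        set ny := ((y : Int) + dy).toNat
        set nx := ((x : Int) + dx).toNat
        have hresf : res = false := by
          rcases res with _ | _
          · rfl
          · exfalso
            rw [pvLoopEq_emptyT f y x m rest v hc h2 h3] at hret
            have := pvDfsLoop_res_true f y x m rest (pvVisS v ny nx)
            rw [hret] at this
            simp at this
        subst hresf
        rw [pvLoopEq_emptyF f y x m rest v hc h2 h3] at hret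
        have hv2 : PvShape (pvVisS v ny nx) (pvH m) (pvW m) := pvShape_set2 _ _ _ hv
        have hunv : pvUnvis (pvVisS v ny nx) + 1 = pvUnvis v :=
          pvUnvis_set_true hv hnyh hnxw h2
        have hb1f : (pvDfs f ny nx m (pvVisS v ny nx)).1 = false := by
          by_contra hb1
          have hb1t : (pvDfs f ny nx m (pvVisS v ny nx)).1 = true := by
            cases hh : (pvDfs f ny nx m (pvVisS v ny nx)).1 <;> simp_all
          rw [hb1t] at hret
          have := pvDfsLoop_res_true f y x m rest (pvDfs f ny nx m (pvVisS v ny nx)).2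
          rw [hret] at this
          simp at this
        rw [hb1f] at hret
        have hreceq : pvDfs f ny nx m (pvVisS v ny nx) =
            (false, (pvDfs f ny nx m (pvVisS v ny nx)).2) := by
          rw [← hb1f]
        obtain ⟨hnb, hnbrcov, hcl23⟩ := IH ny nx (pvVisS v ny nx)
          (pvDfs f ny nx m (pvVisS v ny nx)).2 hnyh hnxw hv2 (by omega) hreceq
        have hv3 : PvShape (pvDfs f ny nx m (pvVisS v ny nx)).2 (pvH m) (pvW m) :=
          (pvDfs_Q f ny nx m (pvVisS v ny nx)).1 _ _ hv2
        have hun3 : pvUnvis (pvDfs f ny nx m (pvVisS v ny nx)).2 ≤ pvUnvis (pvVisS v ny nx) :=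
          (pvDfs_Q f ny nx m (pvVisS v ny nx)).2.2
        obtain ⟨htail1, htail2, htail3⟩ := ih false _ v' hrest hv3 (by omega) hret
        have htailQ : ∀ a b, pvVisG (pvDfs f ny nx m (pvVisS v ny nx)).2 a b = true →
            pvVisG v' a b = true := by
          intro a b hab
          have hQ := (pvDfsLoop_Q f y x m (fun p q v0 => pvDfs_Q f p q m v0) rest false
            (pvDfs f ny nx m (pvVisS v ny nx)).2).2.1 a b hab
          rw [hret] at hQ
          exact hQ
        have hdfsQ : ∀ a b, pvVisG (pvVisS v ny nx) a b = true →
            pvVisG (pvDfs f ny nx m (pvVisS v ny nx)).2 a b = true :=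
          fun a b hab => (pvDfs_Q f ny nx m (pvVisS v ny nx)).2.1 a b hab
        have hself3 : pvVisG (pvDfs f ny nx m (pvVisS v ny nx)).2 ny nx = true := by
          apply hdfsQ
          apply pvGet2_set2_self
          · have := hv.1; omega
          · rw [pvShape_rowlen hv hnyh]; omega
        refine ⟨?_, ?_, ?_⟩
        · intro d hd
          rcases List.mem_cons.mp hd with rfl | hd'
          · exact hc
          · exact htail1 d hd'
        · intro d hd hnoor hcell
          rcases List.mem_cons.mp hd with rfl | hd'
          · exact htailQ _ _ hself3
          · exact htail2 d hd' hnoor hcell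
        · have hcl2 : PvClosed m (pvVisS v ny nx) v' := pvClosed_trans hcl23 htail3 htailQ
          intro a b ha hb h0 hfin
          by_cases heq : ny = a ∧ nx = b
          · obtain ⟨rfl, rfl⟩ := heq
            exact ⟨h3, hnb, fun p q hp hq hadj' hcell' =>
              htailQ p q (hnbrcov p q hp hq hadj' hcell')⟩
          · have h02 : pvVisG (pvVisS v ny nx) a b = false := by
              rw [pvVisS, pvVisG, pvGet2_set2_ne _ _ heq]
              exact h0
            exact hcl2 a b ha hb h02 hfin
      · rw [pvLoopEq_occ f y x m rest res v hc h2 h3] at hret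
        obtain ⟨hrest1, hrest2, hrest3⟩ := ih res v v' hrest hv hfuel hret
        refine ⟨?_, ?_, hrest3⟩
        · intro d hd
          rcases List.mem_cons.mp hd with rfl | hd'
          · exact hc
          · exact hrest1 d hd'
        · intro d hd hnoor hcell
          rcases List.mem_cons.mp hd with rfl | hd'
          · exact absurd hcell h3
          · exact hrest2 d hd' hnoor hcell
    · rw [pvLoopEq_vis f y x m rest res v hc h2] at hret
      obtain ⟨hrest1, hrest2, hrest3⟩ := ih res v v' hrest hv hfuel hret
      refine ⟨?_, ?_, hrest3⟩
      · intro d hd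
        rcases List.mem_cons.mp hd with rfl | hd'
        · exact hc
        · exact hrest1 d hd'
      · intro d hd hnoor hcell
        rcases List.mem_cons.mp hd with rfl | hd'
        · have hQ := (pvDfsLoop_Q f y x m (fun p q v0 => pvDfs_Q f p q m v0) rest res v).2.1
            _ _ h2
          rw [hret] at hQ
          exact hQ
        · exact hrest2 d hd' hnoor hcell

theorem pvDfs_false {m : PvMat} :
    ∀ (fuel p q : Nat) (v v' : PvVis), p < pvH m → q < pvW m →
      PvShape v (pvH m) (pvW m) → pvUnvis v + 1 ≤ fuel →
      pvDfs fuel p q m v = (false, v') →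
      ¬ PvBorder (pvH m) (pvW m) p q ∧
      (∀ c e, c < pvH m → e < pvW m → PvAdj p q c e → pvCell m c e = none →
        pvVisG v' c e = true) ∧ PvClosed m v v' := by
  intro fuel
  induction fuel with
  | zero => intro p q v v' _ _ _ hfuel _; omega
  | succ f ih =>
    intro p q v v' hp hq hv hfuel hret
    rw [pvDfs_succ] at hret
    obtain ⟨h1, h2, h3⟩ := pvDfsLoop_false f p q hp hq
      (fun a b u u' ha hb hu hfu hr => ih a b u u' ha hb hu hfu hr) pvVector false v v'
      (fun d hd => hd) hv hfuel hret
    refine ⟨?_, ?_, h3⟩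
    · intro hb
      obtain ⟨d, hdmem, hoor⟩ := (pvOOR_iff_border hp hq).mpr hb
      exact h1 d hdmem hoor
    · intro c e hcl hel hadj hcell
      obtain ⟨d, hdmem, hnoor, hyeq, hxeq⟩ := pvAdj_complete hp hq hcl hel hadj
      have := h2 d hdmem hnoor (by rw [hyeq, hxeq]; exact hcell)
      rw [hyeq, hxeq] at this
      exact this


-- ---- Layer 5: top-level characterizations and the bridge between the two programs ----

theorem pvDfs_top_true {m : PvMat} (hm : PvShape m (pvH m) (pvW m)) {t : Char} {y x : Nat}
    (hy : y < pvH m) (hx : x < pvW m) (hcell : pvCell m y x = some t)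
    (htrue : (pvDfs (pvH m * pvW m + 1) y x m
      (pvVisS (pvBlank (pvH m) (pvW m)) y x)).1 = true) :
    ∃ n, n + 1 ≤ pvH m * pvW m ∧ PvAcc m (pvH m) (pvW m) n y x := by
  have hv0 : PvShape (pvVisS (pvBlank (pvH m) (pvW m)) y x) (pvH m) (pvW m) :=
    pvShape_set2 _ _ _ (pvShape_blank _ _)
  have hunv : pvUnvis (pvVisS (pvBlank (pvH m) (pvW m)) y x) + 1 = pvH m * pvW m := by
    rw [pvUnvis_set_true (pvShape_blank _ _) hy hx (pvVisG_blank _ _ _ _), pvUnvis_blank]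
  obtain ⟨n, hn, hacc⟩ := pvDfs_true (pvH m * pvW m + 1) y x _ hy hx hv0 htrue
  exact ⟨n, by omega, hacc⟩

theorem pvDfs_top_false {m : PvMat} (hm : PvShape m (pvH m) (pvW m)) {t : Char} {y x : Nat}
    (hy : y < pvH m) (hx : x < pvW m) (hcell : pvCell m y x = some t)
    (hfalse : (pvDfs (pvH m * pvW m + 1) y x m
      (pvVisS (pvBlank (pvH m) (pvW m)) y x)).1 = false) :
    ∀ n, ¬ PvAcc m (pvH m) (pvW m) n y x := by
  have hv0 : PvShape (pvVisS (pvBlank (pvH m) (pvW m)) y x) (pvH m) (pvW m) :=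
    pvShape_set2 _ _ _ (pvShape_blank _ _)
  have hunv : pvUnvis (pvVisS (pvBlank (pvH m) (pvW m)) y x) + 1 = pvH m * pvW m := by
    rw [pvUnvis_set_true (pvShape_blank _ _) hy hx (pvVisG_blank _ _ _ _), pvUnvis_blank]
  have hret : pvDfs (pvH m * pvW m + 1) y x m (pvVisS (pvBlank (pvH m) (pvW m)) y x) =
      (false, (pvDfs (pvH m * pvW m + 1) y x m (pvVisS (pvBlank (pvH m) (pvW m)) y x)).2) := by
    rw [← hfalse]
  obtain ⟨hnb, hcov, hcl⟩ := pvDfs_false (pvH m * pvW m + 1) y x _ _ hy hx hv0 (by omega) hret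
  -- no visited start: a visited cell other than (y, x) was fresh, hence empty and closed
  have hv0get : ∀ a b, pvCell m a b = none →
      pvVisG (pvVisS (pvBlank (pvH m) (pvW m)) y x) a b = false := by
    intro a b hab
    have hne : ¬ (y = a ∧ x = b) := by
      rintro ⟨rfl, rfl⟩
      rw [hcell] at hab
      exact Option.some_ne_none t hab
    rw [pvVisS, pvVisG, pvGet2_set2_ne _ _ hne]
    exact pvVisG_blank _ _ _ _
  have haux : ∀ n a b, a < pvH m → b < pvW m → pvCell m a b = none →
      pvVisG (pvDfs (pvH m * pvW m + 1) y x m (pvVisS (pvBlank (pvH m) (pvW m)) y x)).2 a b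
        = true → ¬ PvAcc m (pvH m) (pvW m) n a b := by
    intro n
    induction n with
    | zero =>
      intro a b ha hb hcellab hvis hacc
      exact (hcl a b ha hb (hv0get a b hcellab) hvis).2.1 hacc
    | succ k ih =>
      intro a b ha hb hcellab hvis hacc
      obtain ⟨_, hnbord, hnbr⟩ := hcl a b ha hb (hv0get a b hcellab) hvis
      rcases hacc with hbord | ⟨p, q, hp, hq, hadj, hcellpq, haccpq⟩
      · exact hnbord hbord
      · exact ih p q hp hq hcellpq (hnbr p q hp hq hadj hcellpq) haccpq
  intro n hacc
  rcases n with _ | k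
  · exact hnb hacc
  · rcases hacc with hbord | ⟨p, q, hp, hq, hadj, hcellpq, haccpq⟩
    · exact hnb hbord
    · exact haux k p q hp hq hcellpq (hcov p q hp hq hadj hcellpq) haccpq

-- B's loop is plain iteration of the relaxation step (the break can only hit a fixed point)
theorem pvExtIter_eq (g : PvMat) (h w : Nat) :
    ∀ (k : Nat) (e : PvVis), pvExtIter g h w k e = (pvStep g h w)^[k] e := by
  intro k
  induction k with
  | zero => intro e; simp [pvExtIter]
  | succ n ih =>
    intro e
    simp only [pvExtIter]
    by_cases hfix : pvStep g h w e = e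
    · rw [if_pos (by simp [hfix])]
      exact (Function.iterate_fixed hfix (n + 1)).symm
    · rw [if_neg (by simp [hfix]), ih, Function.iterate_succ_apply]

theorem pvStep_get (g : PvMat) (h w : Nat) (e : PvVis) {y x : Nat} (hy : y < h) (hx : x < w) :
    pvVisG (pvStep g h w e) y x = (pvCell g y x == none && pvLiftable e h w y x) := by
  rw [pvVisG, pvGet2_nf, pvStep]
  rw [List.getElem?_map, List.getElem?_range hy]
  simp only [Option.map_some, Option.getD_some]
  rw [List.getElem?_map, List.getElem?_range hx]
  simp

theorem pvLiftable_iff (e : PvVis) {h w y x : Nat} (hy : y < h) (hx : x < w) :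
    pvLiftable e h w y x = true ↔
      (PvBorder h w y x ∨ ∃ p q, p < h ∧ q < w ∧ PvAdj y x p q ∧ pvVisG e p q = true) := by
  simp only [pvLiftable, Bool.or_eq_true, Bool.and_eq_true, beq_iff_eq, decide_eq_true_eq]
  constructor
  · rintro (((((((h0 | h0) | h0) | h0) | ⟨hg, he⟩) | ⟨hg, he⟩) | ⟨hg, he⟩) | ⟨hg, he⟩)
    · exact Or.inl (Or.inl h0)
    · exact Or.inl (Or.inr (Or.inl h0))
    · exact Or.inl (Or.inr (Or.inr (Or.inl h0)))
    · exact Or.inl (Or.inr (Or.inr (Or.inr h0)))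
    · exact Or.inr ⟨y - 1, x, by omega, hx, Or.inl ⟨rfl, Or.inl (by omega)⟩, he⟩
    · exact Or.inr ⟨y + 1, x, by omega, hx, Or.inl ⟨rfl, Or.inr rfl⟩, he⟩
    · exact Or.inr ⟨y, x - 1, hy, by omega, Or.inr ⟨rfl, Or.inl (by omega)⟩, he⟩
    · exact Or.inr ⟨y, x + 1, hy, by omega, Or.inr ⟨rfl, Or.inr rfl⟩, he⟩
  · rintro ((h0 | h0 | h0 | h0) | ⟨p, q, hp, hq, hadj, he⟩)
    · exact Or.inl (Or.inl (Or.inl (Or.inl (Or.inl (Or.inl (Or.inl h0))))))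
    · exact Or.inl (Or.inl (Or.inl (Or.inl (Or.inl (Or.inl (Or.inr h0))))))
    · exact Or.inl (Or.inl (Or.inl (Or.inl (Or.inl (Or.inr h0)))))
    · exact Or.inl (Or.inl (Or.inl (Or.inl (Or.inr h0))))
    · rcases hadj with ⟨rfl, hcase | hcase⟩ | ⟨rfl, hcase | hcase⟩
      · refine Or.inl (Or.inl (Or.inl (Or.inr ⟨by omega, ?_⟩)))
        have : y - 1 = p := by omega
        rw [this]; exact he
      · refine Or.inl (Or.inl (Or.inr ⟨by omega, ?_⟩))
        have : y + 1 = p := by omega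
        rw [this]; exact he
      · refine Or.inl (Or.inr ⟨by omega, ?_⟩)
        have : x - 1 = q := by omega
        rw [this]; exact he
      · refine Or.inr ⟨by omega, ?_⟩
        have : x + 1 = q := by omega
        rw [this]; exact he

theorem pvExt_char (g : PvMat) (h w : Nat) :
    ∀ (k y x : Nat), y < h → x < w →
      (pvVisG ((pvStep g h w)^[k + 1] (pvBlank h w)) y x = true ↔
        (pvCell g y x = none ∧ PvAcc g h w k y x)) := by
  intro k
  induction k with
  | zero =>
    intro y x hy hx
    have h1 : (pvStep g h w)^[0 + 1] (pvBlank h w) = pvStep g h w (pvBlank h w) := by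
      simp
    rw [h1, pvStep_get g h w _ hy hx]
    simp only [Bool.and_eq_true, beq_iff_eq]
    constructor
    · rintro ⟨hcell, hlift⟩
      refine ⟨hcell, ?_⟩
      rcases (pvLiftable_iff _ hy hx).mp hlift with hb | ⟨p, q, hp, hq, _, he⟩
      · exact hb
      · rw [pvVisG_blank] at he; exact absurd he (by simp)
    · rintro ⟨hcell, hacc⟩
      exact ⟨hcell, (pvLiftable_iff _ hy hx).mpr (Or.inl hacc)⟩
  | succ k ih =>
    intro y x hy hx
    rw [Function.iterate_succ_apply', pvStep_get g h w _ hy hx]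
    simp only [Bool.and_eq_true, beq_iff_eq]
    constructor
    · rintro ⟨hcell, hlift⟩
      refine ⟨hcell, ?_⟩
      rcases (pvLiftable_iff _ hy hx).mp hlift with hb | ⟨p, q, hp, hq, hadj, he⟩
      · exact Or.inl hb
      · obtain ⟨hc, ha⟩ := (ih p q hp hq).mp he
        exact Or.inr ⟨p, q, hp, hq, hadj, hc, ha⟩
    · rintro ⟨hcell, hacc⟩
      refine ⟨hcell, ?_⟩
      rcases hacc with hb | ⟨p, q, hp, hq, hadj, hc, ha⟩
      · exact (pvLiftable_iff _ hy hx).mpr (Or.inl hb)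
      · exact (pvLiftable_iff _ hy hx).mpr
          (Or.inr ⟨p, q, hp, hq, hadj, (ih p q hp hq).mpr ⟨hc, ha⟩⟩)

-- the heart of the equivalence: per target cell, A's dfs answer = B's neighbour test
theorem pvBridge {m : PvMat} (hm : PvShape m (pvH m) (pvW m)) {t : Char} {y x : Nat}
    (hy : y < pvH m) (hx : x < pvW m) (hcell : pvCell m y x = some t) :
    (pvDfs (pvH m * pvW m + 1) y x m (pvVisS (pvBlank (pvH m) (pvW m)) y x)).1 =
      pvLiftable (pvExterior m (pvH m) (pvW m)) (pvH m) (pvW m) y x := by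
  have hHW : 1 ≤ pvH m * pvW m := by
    have : 0 < pvH m := by omega
    have : 0 < pvW m := by omega
    exact Nat.one_le_iff_ne_zero.mpr (by positivity)
  obtain ⟨k, hk⟩ : ∃ k, pvH m * pvW m = k + 1 := ⟨pvH m * pvW m - 1, by omega⟩
  have hEx : pvExterior m (pvH m) (pvW m) =
      (pvStep m (pvH m) (pvW m))^[k + 1] (pvBlank (pvH m) (pvW m)) := by
    rw [pvExterior, pvExtIter_eq, hk]
  by_cases hdfs : (pvDfs (pvH m * pvW m + 1) y x m
      (pvVisS (pvBlank (pvH m) (pvW m)) y x)).1 = true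
  · rw [hdfs]
    obtain ⟨n, hn, hacc⟩ := pvDfs_top_true hm hy hx hcell hdfs
    symm
    rw [hEx]
    rcases n with _ | n'
    · exact (pvLiftable_iff _ hy hx).mpr (Or.inl hacc)
    · rcases hacc with hb | ⟨p, q, hp, hq, hadj, hc, ha⟩
      · exact (pvLiftable_iff _ hy hx).mpr (Or.inl hb)
      · refine (pvLiftable_iff _ hy hx).mpr (Or.inr ⟨p, q, hp, hq, hadj, ?_⟩)
        exact (pvExt_char m (pvH m) (pvW m) k p q hp hq).mpr
          ⟨hc, pvAcc_mono (by omega) ha⟩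
  · have hdfsf : (pvDfs (pvH m * pvW m + 1) y x m
        (pvVisS (pvBlank (pvH m) (pvW m)) y x)).1 = false := by
      cases hh : (pvDfs (pvH m * pvW m + 1) y x m
        (pvVisS (pvBlank (pvH m) (pvW m)) y x)).1 <;> simp_all
    rw [hdfsf]
    symm
    rw [hEx]
    have hnoacc := pvDfs_top_false hm hy hx hcell hdfsf
    by_contra hlift
    have hliftt : pvLiftable ((pvStep m (pvH m) (pvW m))^[k + 1] (pvBlank (pvH m) (pvW m)))
        (pvH m) (pvW m) y x = true := by
      cases hh : pvLiftable ((pvStep m (pvH m) (pvW m))^[k + 1] (pvBlank (pvH m) (pvW m)))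
        (pvH m) (pvW m) y x <;> simp_all
    rcases (pvLiftable_iff _ hy hx).mp hliftt with hb | ⟨p, q, hp, hq, hadj, he⟩
    · exact hnoacc 0 hb
    · obtain ⟨hc, ha⟩ := (pvExt_char m (pvH m) (pvW m) k p q hp hq).mp he
      exact hnoacc (k + 1) (Or.inr ⟨p, q, hp, hq, hadj, hc, ha⟩)


-- ---- Layer 6: what the matrix-level folds of both ports compute, cell by cell ----

theorem pvFold_shape {α : Type} {h w : Nat} (F : PvMat → α → PvMat)
    (hF : ∀ cp z, PvShape cp h w → PvShape (F cp z) h w) :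
    ∀ (xs : List α) (cp : PvMat), PvShape cp h w → PvShape (xs.foldl F cp) h w := by
  intro xs
  induction xs with
  | nil => intro cp hcp; exact hcp
  | cons z xs ih => intro cp hcp; exact ih (F cp z) (hF cp z hcp)

theorem pvSetFold_get {h w : Nat} (yy : Nat) (C : Nat → Bool) {a b : Nat}
    (hyy : yy < h) (ha : a < h) (hb : b < w) :
    ∀ (xs : List Nat) (cp : PvMat), PvShape cp h w → (∀ z ∈ xs, z < w) →
      pvCell ((xs.foldl (fun cp x => if C x then pvCellS cp yy x else cp) cp)) a b =
        if a = yy ∧ b ∈ xs ∧ C b = true then none else pvCell cp a b := by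
  intro xs
  induction xs with
  | nil => intro cp hcp _; simp
  | cons x' xs ih =>
    intro cp hcp hxs
    have hx'w : x' < w := hxs x' (by simp)
    have hxsw : ∀ z ∈ xs, z < w := fun z hz => hxs z (by simp [hz])
    have hcp1 : PvShape (if C x' then pvCellS cp yy x' else cp) h w := by
      split_ifs
      · exact pvShape_set2 _ _ _ hcp
      · exact hcp
    rw [List.foldl_cons, ih _ hcp1 hxsw]
    by_cases hc : a = yy ∧ b ∈ xs ∧ C b = true
    · rw [if_pos hc, if_pos ⟨hc.1, by simp [hc.2.1], hc.2.2⟩]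
    · rw [if_neg hc]
      by_cases hc2 : a = yy ∧ b ∈ x' :: xs ∧ C b = true
      · rw [if_pos hc2]
        obtain ⟨rfl, hbmem, hCb⟩ := hc2
        have hbx' : b = x' := by
          rcases List.mem_cons.mp hbmem with rfl | hbxs
          · rfl
          · exact absurd ⟨rfl, hbxs, hCb⟩ hc
        subst hbx'
        rw [if_pos hCb,
          pvCellS_get_self (by have := hcp.1; omega) (by rw [pvShape_rowlen hcp hyy]; omega)]
      · rw [if_neg hc2]
        rcases hCx : C x' with _ | _
        · rw [if_neg (by simp [hCx])]
        · rw [if_pos (by simp [hCx])]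
          have hne : ¬ (yy = a ∧ x' = b) := by
            rintro ⟨rfl, rfl⟩
            exact hc2 ⟨rfl, by simp, hCx⟩
          rw [pvCellS_get_ne hne]

theorem pvRemFoldRow_get {h w : Nat} (t : Char) (yy : Nat) {a b : Nat}
    (hyy : yy < h) (ha : a < h) (hb : b < w) :
    ∀ (xs : List Nat) (cp : PvMat), PvShape cp h w → (∀ z ∈ xs, z < w) →
      pvCell ((xs.foldl (fun cp x => if pvCell cp yy x == some t then pvCellS cp yy x else cp) cp)) a b =
        if a = yy ∧ b ∈ xs ∧ pvCell cp a b = some t then none else pvCell cp a b := by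
  intro xs
  induction xs with
  | nil => intro cp hcp _; simp
  | cons x' xs ih =>
    intro cp hcp hxs
    have hx'w : x' < w := hxs x' (by simp)
    have hxsw : ∀ z ∈ xs, z < w := fun z hz => hxs z (by simp [hz])
    have hcp1 : PvShape (if pvCell cp yy x' == some t then pvCellS cp yy x' else cp) h w := by
      split_ifs
      · exact pvShape_set2 _ _ _ hcp
      · exact hcp
    rw [List.foldl_cons, ih _ hcp1 hxsw]
    by_cases heq : a = yy ∧ b = x'
    · obtain ⟨rfl, rfl⟩ := heq
      by_cases hcab : pvCell cp a b = some t
      · have hself : pvCell (pvCellS cp a b) a b = none :=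
          pvCellS_get_self (by have := hcp.1; omega) (by rw [pvShape_rowlen hcp hyy]; omega)
        have hcp1e : (if pvCell cp a b == some t then pvCellS cp a b else cp) = pvCellS cp a b :=
          if_pos (by simp [hcab])
        rw [hcp1e, hself, if_neg (by rintro ⟨_, _, hcc⟩; exact Option.some_ne_none t hcc.symm),
          if_pos ⟨rfl, by simp, hcab⟩]
      · have hcp1e : (if pvCell cp a b == some t then pvCellS cp a b else cp) = cp :=
          if_neg (by simp [hcab])
        rw [hcp1e, if_neg (by rintro ⟨_, _, hcc⟩; exact hcab hcc),
          if_neg (by rintro ⟨_, _, hcc⟩; exact hcab hcc)]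
    · have hkeep : pvCell (if pvCell cp yy x' == some t then pvCellS cp yy x' else cp) a b =
          pvCell cp a b := by
        split_ifs
        · rw [pvCellS_get_ne (by rintro ⟨rfl, rfl⟩; exact heq ⟨rfl, rfl⟩)]
        · rfl
      rw [hkeep]
      by_cases hc : a = yy ∧ b ∈ xs ∧ pvCell cp a b = some t
      · rw [if_pos hc, if_pos ⟨hc.1, by simp [hc.2.1], hc.2.2⟩]
      · rw [if_neg hc]
        rw [if_neg (by
          rintro ⟨rfl, hbmem, hcc⟩
          rcases List.mem_cons.mp hbmem with rfl | hbxs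
          · exact heq ⟨rfl, rfl⟩
          · exact hc ⟨rfl, hbxs, hcc⟩)]

-- the dfs answer boundary_check consults for one cell
def pvDfsTrueB (m : PvMat) (y x : Nat) : Bool :=
  (pvDfs (pvH m * pvW m + 1) y x m (pvVisS (pvBlank (pvH m) (pvW m)) y x)).1

theorem pvW_of_shape {m : PvMat} {h w : Nat} (hs : PvShape m h w) (hh : 0 < h) :
    pvW m = w :=
  pvShape_rowlen hs hh

theorem pvBC_shape {m : PvMat} {h w : Nat} (t : Char) (hm : PvShape m h w) :
    PvShape (pvBoundaryCheck t m) h w := by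
  rw [pvBoundaryCheck]
  apply pvFold_shape _ ?_ _ _ hm
  intro cp y hcp
  apply pvFold_shape _ ?_ _ _ hcp
  intro cp' x hcp'
  split_ifs
  · exact pvShape_set2 _ _ _ hcp'
  · exact hcp'
  · exact hcp'

theorem pvBC_get {m : PvMat} (t : Char) (hm : PvShape m (pvH m) (pvW m)) {a b : Nat}
    (ha : a < pvH m) (hb : b < pvW m) :
    pvCell (pvBoundaryCheck t m) a b =
      if ((pvCell m a b == some t) && pvDfsTrueB m a b) = true then none
      else pvCell m a b := by
  have hinner : ∀ (yy : Nat) (cp : PvMat), yy < pvH m → PvShape cp (pvH m) (pvW m) →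
      pvCell ((List.range (pvW m)).foldl (fun cp x =>
        if pvCell m yy x == some t then
          if (pvDfs (pvH m * pvW m + 1) yy x m (pvVisS (pvBlank (pvH m) (pvW m)) yy x)).1 then
            pvCellS cp yy x
          else cp
        else cp) cp) a b =
      if a = yy ∧ ((pvCell m a b == some t) && pvDfsTrueB m a b) = true then none
      else pvCell cp a b := by
    intro yy cp hyy hcp
    have hfun : ((fun cp x =>
        if pvCell m yy x == some t then
          if (pvDfs (pvH m * pvW m + 1) yy x m (pvVisS (pvBlank (pvH m) (pvW m)) yy x)).1 then
            pvCellS cp yy x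
          else cp
        else cp) : PvMat → Nat → PvMat) = (fun cp x =>
        if ((pvCell m yy x == some t) && pvDfsTrueB m yy x) = true then pvCellS cp yy x
        else cp) := by
      funext cp x
      rcases hc1 : pvCell m yy x == some t with _ | _
      · simp [pvDfsTrueB, hc1]
      · rcases hc2 : (pvDfs (pvH m * pvW m + 1) yy x m
          (pvVisS (pvBlank (pvH m) (pvW m)) yy x)).1 with _ | _
        · simp [pvDfsTrueB, hc1, hc2]
        · simp [pvDfsTrueB, hc1, hc2]
    rw [hfun, pvSetFold_get yy (fun x => (pvCell m yy x == some t) && pvDfsTrueB m yy x)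
      hyy ha hb (List.range (pvW m)) cp hcp (fun z hz => List.mem_range.mp hz)]
    by_cases hcnd : a = yy ∧ ((pvCell m a b == some t) && pvDfsTrueB m a b) = true
    · rw [if_pos ⟨hcnd.1, List.mem_range.mpr hb, by rw [← hcnd.1]; exact hcnd.2⟩, if_pos hcnd]
    · rw [if_neg (by rintro ⟨rfl, _, hcc⟩; exact hcnd ⟨rfl, hcc⟩), if_neg hcnd]
  have houter : ∀ (ys : List Nat) (cp : PvMat), (∀ z ∈ ys, z < pvH m) →
      PvShape cp (pvH m) (pvW m) →
      pvCell (ys.foldl (fun cp y => (List.range (pvW m)).foldl (fun cp x =>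
        if pvCell m y x == some t then
          if (pvDfs (pvH m * pvW m + 1) y x m (pvVisS (pvBlank (pvH m) (pvW m)) y x)).1 then
            pvCellS cp y x
          else cp
        else cp) cp) cp) a b =
      if a ∈ ys ∧ ((pvCell m a b == some t) && pvDfsTrueB m a b) = true then none
      else pvCell cp a b := by
    intro ys
    induction ys with
    | nil => intro cp _ _; simp
    | cons y' ys ih =>
      intro cp hys hcp
      have hy' : y' < pvH m := hys y' (by simp)
      have hysr : ∀ z ∈ ys, z < pvH m := fun z hz => hys z (by simp [hz])
      have hcp1 : PvShape ((List.range (pvW m)).foldl (fun cp x =>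
          if pvCell m y' x == some t then
            if (pvDfs (pvH m * pvW m + 1) y' x m (pvVisS (pvBlank (pvH m) (pvW m)) y' x)).1 then
              pvCellS cp y' x
            else cp
          else cp) cp) (pvH m) (pvW m) := by
        apply pvFold_shape _ ?_ _ _ hcp
        intro cp' x hcp'
        split_ifs
        · exact pvShape_set2 _ _ _ hcp'
        · exact hcp'
        · exact hcp'
      rw [List.foldl_cons, ih _ hysr hcp1, hinner y' cp hy' hcp]
      simp only [List.mem_cons]
      rcases eq_or_ne a y' with rfl | hay
      · by_cases hcnd : ((pvCell m a b == some t) && pvDfsTrueB m a b) = true <;>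
          by_cases hmem : a ∈ ys <;> simp [hcnd, hmem]
      · by_cases hcnd : ((pvCell m a b == some t) && pvDfsTrueB m a b) = true <;>
          by_cases hmem : a ∈ ys <;> simp [hcnd, hmem, hay]
  rw [pvBoundaryCheck, houter (List.range (pvH m)) m (fun z hz => List.mem_range.mp hz) hm]
  by_cases hcnd : ((pvCell m a b == some t) && pvDfsTrueB m a b) = true
  · rw [if_pos ⟨List.mem_range.mpr ha, hcnd⟩, if_pos hcnd]
  · rw [if_neg (fun hcon => hcnd hcon.2), if_neg hcnd]

theorem pvRA_shape {m : PvMat} {h w : Nat} (t : Char) (hm : PvShape m h w) :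
    PvShape (pvRemoveAll t m) h w := by
  rw [pvRemoveAll]
  apply pvFold_shape _ ?_ _ _ hm
  intro cp y hcp
  apply pvFold_shape _ ?_ _ _ hcp
  intro cp' x hcp'
  split_ifs
  · exact pvShape_set2 _ _ _ hcp'
  · exact hcp'

theorem pvRA_get {m : PvMat} (t : Char) (hm : PvShape m (pvH m) (pvW m)) {a b : Nat}
    (ha : a < pvH m) (hb : b < pvW m) :
    pvCell (pvRemoveAll t m) a b =
      if pvCell m a b = some t then none else pvCell m a b := by
  have houter : ∀ (ys : List Nat) (cp : PvMat), (∀ z ∈ ys, z < pvH m) →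
      PvShape cp (pvH m) (pvW m) →
      pvCell (ys.foldl (fun acc y => (List.range (pvW acc)).foldl (fun acc x =>
        if pvCell acc y x == some t then pvCellS acc y x else acc) acc) cp) a b =
      if a ∈ ys ∧ pvCell cp a b = some t then none else pvCell cp a b := by
    intro ys
    induction ys with
    | nil => intro cp _ _; simp
    | cons y' ys ih =>
      intro cp hys hcp
      have hy' : y' < pvH m := hys y' (by simp)
      have hysr : ∀ z ∈ ys, z < pvH m := fun z hz => hys z (by simp [hz])
      have hw : pvW cp = pvW m := pvW_of_shape hcp (by omega)
      have hcp1 : PvShape ((List.range (pvW cp)).foldl (fun acc x =>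
          if pvCell acc y' x == some t then pvCellS acc y' x else acc) cp) (pvH m) (pvW m) := by
        apply pvFold_shape _ ?_ _ _ hcp
        intro cp' x hcp'
        split_ifs
        · exact pvShape_set2 _ _ _ hcp'
        · exact hcp'
      have hcell1 : pvCell ((List.range (pvW cp)).foldl (fun acc x =>
          if pvCell acc y' x == some t then pvCellS acc y' x else acc) cp) a b =
          if a = y' ∧ pvCell cp a b = some t then none else pvCell cp a b := by
        rw [hw, pvRemFoldRow_get t y' hy' ha hb (List.range (pvW m)) cp hcp
          (fun z hz => List.mem_range.mp hz)]
        by_cases hcnd : a = y' ∧ pvCell cp a b = some t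
        · rw [if_pos ⟨hcnd.1, List.mem_range.mpr hb, hcnd.2⟩, if_pos hcnd]
        · rw [if_neg (by rintro ⟨rfl, _, hcc⟩; exact hcnd ⟨rfl, hcc⟩), if_neg hcnd]
      rw [List.foldl_cons, ih _ hysr hcp1, hcell1]
      simp only [List.mem_cons]
      rcases eq_or_ne a y' with rfl | hay
      · by_cases hcab : pvCell cp a b = some t <;> by_cases hmem : a ∈ ys <;>
          simp [hcab, hmem]
      · by_cases hcab : pvCell cp a b = some t <;> by_cases hmem : a ∈ ys <;>
          simp [hcab, hmem, hay]
  rw [pvRemoveAll, houter (List.range m.length) m (fun z hz => List.mem_range.mp hz) hm]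
  have : a ∈ List.range m.length := List.mem_range.mpr ha
  simp [this]

-- B's two grid rebuilds, cell by cell
theorem pvRebuild_shape (g : PvMat) (t : Char) (ext : PvVis) (h w : Nat) :
    PvShape ((List.range h).map (fun y => (List.range w).map (fun x =>
      if pvCell g y x == some t && pvLiftable ext h w y x then none else pvCell g y x))) h w := by
  constructor
  · simp
  · intro r hr
    simp only [List.mem_map] at hr
    obtain ⟨y, _, rfl⟩ := hr
    simp

theorem pvRebuild_get (g : PvMat) (t : Char) (ext : PvVis) (h w : Nat) {a b : Nat}
    (ha : a < h) (hb : b < w) :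
    pvCell ((List.range h).map (fun y => (List.range w).map (fun x =>
      if pvCell g y x == some t && pvLiftable ext h w y x then none else pvCell g y x))) a b =
      if pvCell g a b == some t && pvLiftable ext h w a b then none else pvCell g a b := by
  rw [pvCell, pvGet2_nf, List.getElem?_map, List.getElem?_range ha]
  simp only [Option.map_some, Option.getD_some]
  rw [List.getElem?_map, List.getElem?_range hb]
  simp

theorem pvMapRow_shape (g : PvMat) {h w : Nat} (fc : Option Char → Option Char)
    (hs : PvShape g h w) : PvShape (g.map (fun row => row.map fc)) h w := by
  obtain ⟨hl, hr⟩ := hs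
  constructor
  · simp [hl]
  · intro r hrm
    simp only [List.mem_map] at hrm
    obtain ⟨row, hrow, rfl⟩ := hrm
    simp [hr row hrow]

theorem pvMapRow_get (g : PvMat) (fc : Option Char → Option Char) (hnone : fc none = none)
    (a b : Nat) : pvCell (g.map (fun row => row.map fc)) a b = fc (pvCell g a b) := by
  rw [pvCell, pvCell, pvGet2_nf, pvGet2_nf, List.getElem?_map]
  rcases hga : g[a]? with _ | row
  · simp [hnone]
  · simp only [Option.map_some, Option.getD_some]
    rw [List.getElem?_map]
    rcases hrb : row[b]? with _ | c
    · simp [hnone]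
    · simp

-- matrices of the same shape with the same cells are equal
theorem pvMat_ext {m1 m2 : PvMat} {h w : Nat} (hs1 : PvShape m1 h w) (hs2 : PvShape m2 h w)
    (hcell : ∀ a b, a < h → b < w → pvCell m1 a b = pvCell m2 a b) : m1 = m2 := by
  apply List.ext_getElem (by have := hs1.1; have := hs2.1; omega)
  intro a ha1 ha2
  apply List.ext_getElem (by have h1 := hs1.2 _ (List.getElem_mem ha1); have h2 := hs2.2 _ (List.getElem_mem ha2); omega)
  intro b hb1 hb2
  have hah : a < h := by have := hs1.1; omega
  have hbw : b < w := by
    have := hs1.2 _ (List.getElem_mem ha1); omega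
  have h1 : pvCell m1 a b = m1[a][b] := by
    rw [pvCell, pvGet2_nf, List.getElem?_eq_getElem ha1, Option.getD_some,
      List.getElem?_eq_getElem hb1, Option.getD_some]
  have h2 : pvCell m2 a b = m2[a][b] := by
    rw [pvCell, pvGet2_nf, List.getElem?_eq_getElem ha2, Option.getD_some,
      List.getElem?_eq_getElem hb2, Option.getD_some]
  rw [← h1, ← h2]
  exact hcell a b hah hbw

-- the two counting passes agree
theorem pvRowCount (row : List (Option Char)) :
    ∀ acc : Int, row.foldl (fun acc v => if v != none then acc + 1 else acc) acc =
      acc + (row.countP (fun v => v != none) : Int) := by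
  induction row with
  | nil => intro acc; simp
  | cons c row ih =>
    intro acc
    rcases hc : (c != none) with _ | _
    · rw [List.foldl_cons, if_neg (by simp [hc]), ih acc, List.countP_cons, hc]
      simp
    · rw [List.foldl_cons, if_pos hc, ih (acc + 1), List.countP_cons, hc]
      simp
      omega

theorem pvSum_eq (m : PvMat) :
    pvSumMatrix m = m.foldl (fun acc row => acc + (row.countP (fun v => v != none) : Int)) 0 := by
  rw [pvSumMatrix]
  have : ∀ (rows : List (List (Option Char))) (acc : Int),
      rows.foldl (fun acc row => row.foldl (fun acc v => if v != none then acc + 1 else acc) acc) acc =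
      rows.foldl (fun acc row => acc + (row.countP (fun v => v != none) : Int)) acc := by
    intro rows
    induction rows with
    | nil => intro acc; rfl
    | cons row rows ih =>
      intro acc
      rw [List.foldl_cons, List.foldl_cons, pvRowCount row acc, ih]
  exact this m 0


-- ---- Layer 7: the per-request steps agree, hence the whole folds agree ----

theorem pvCrane_eq {m : PvMat} (t : Char) (hm : PvShape m (pvH m) (pvW m)) :
    pvBoundaryCheck t m = (List.range (pvH m)).map (fun y => (List.range (pvW m)).map (fun x =>
      if pvCell m y x == some t &&
          pvLiftable (pvExterior m (pvH m) (pvW m)) (pvH m) (pvW m) y x then none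
      else pvCell m y x)) := by
  apply pvMat_ext (pvBC_shape t hm)
    (pvRebuild_shape m t (pvExterior m (pvH m) (pvW m)) (pvH m) (pvW m))
  intro a b ha hb
  rw [pvBC_get t hm ha hb, pvRebuild_get m t _ (pvH m) (pvW m) ha hb]
  rcases hc : pvCell m a b == some t with _ | _
  · simp [hc]
  · have hcell : pvCell m a b = some t := by simpa using hc
    have hbr : pvDfsTrueB m a b =
        pvLiftable (pvExterior m (pvH m) (pvW m)) (pvH m) (pvW m) a b :=
      pvBridge hm ha hb hcell
    rw [hbr]

theorem pvRemove_eq {m : PvMat} (t : Char) (hm : PvShape m (pvH m) (pvW m)) :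
    pvRemoveAll t m = m.map (fun row => row.map (fun c => if c == some t then none else c)) := by
  apply pvMat_ext (pvRA_shape t hm) (pvMapRow_shape m _ hm)
  intro a b ha hb
  rw [pvRA_get t hm ha hb, pvMapRow_get m _ (by simp) a b]
  by_cases hcell : pvCell m a b = some t <;> simp [hcell]

theorem pvShape_self {m : PvMat} {h0 w0 : Nat} (hm : PvShape m h0 w0)
    (hw0 : h0 = 0 → w0 = 0) : PvShape m (pvH m) (pvW m) := by
  have hH : pvH m = h0 := hm.1
  have hW : pvW m = w0 := by
    rcases Nat.eq_zero_or_pos h0 with h0z | h0p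
    · have hnil : m = [] := List.length_eq_zero_iff.mp (by rw [hm.1, h0z])
      subst hnil
      simp [pvW, hw0 h0z]
    · exact pvW_of_shape hm h0p
  rw [hH, hW]
  exact hm

theorem pvFoldReq_eq (h0 w0 : Nat) (hw0 : h0 = 0 → w0 = 0) :
    ∀ (reqs : List String) (m : PvMat), (∀ r ∈ reqs, r.toList ≠ []) → PvShape m h0 w0 →
      (reqs.foldl (fun m req => match req.toList with
        | [c] => pvBoundaryCheck c m
        | c :: _ => pvRemoveAll c m
        | [] => m) m) =
      (reqs.foldl (fun g req => match req.toList with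
        | [] => g
        | t :: rest =>
          if rest.isEmpty then
            (List.range h0).map (fun y => (List.range w0).map (fun x =>
              if pvCell g y x == some t && pvLiftable (pvExterior g h0 w0) h0 w0 y x then none
              else pvCell g y x))
          else g.map (fun row => row.map (fun c => if c == some t then none else c))) m) := by
  intro reqs
  induction reqs with
  | nil => intro m _ _; rfl
  | cons req reqs ih =>
    intro m hne hm
    have hnereq : req.toList ≠ [] := hne req (by simp)
    have hnerest : ∀ r ∈ reqs, r.toList ≠ [] := fun r hr => hne r (by simp [hr])
    have hmself : PvShape m (pvH m) (pvW m) := pvShape_self hm hw0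
    have hH : pvH m = h0 := hm.1
    have hW : pvW m = w0 := by
      rcases Nat.eq_zero_or_pos h0 with h0z | h0p
      · have hnil : m = [] := List.length_eq_zero_iff.mp (by rw [hm.1, h0z])
        subst hnil
        simp [pvW, hw0 h0z]
      · exact pvW_of_shape hm h0p
    rcases hreq : req.toList with _ | ⟨t, rest⟩
    · exact absurd hreq hnereq
    rcases rest with _ | ⟨c2, rest2⟩
    · -- crane request
      have hstep : pvBoundaryCheck t m =
          (List.range h0).map (fun y => (List.range w0).map (fun x =>
            if pvCell m y x == some t && pvLiftable (pvExterior m h0 w0) h0 w0 y x then none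
            else pvCell m y x)) := by
        have := pvCrane_eq t hmself
        rw [hH, hW] at this
        exact this
      have hshape1 : PvShape (pvBoundaryCheck t m) h0 w0 := pvBC_shape t hm
      simp only [List.foldl_cons, hreq, List.isEmpty_nil, eq_self_iff_true, if_true]
      rw [← hstep]
      exact ih (pvBoundaryCheck t m) hnerest hshape1
    · -- removal request
      have hstep : pvRemoveAll t m =
          m.map (fun row => row.map (fun c => if c == some t then none else c)) :=
        pvRemove_eq t hmself
      have hshape1 : PvShape (pvRemoveAll t m) h0 w0 := pvRA_shape t hm
      simp only [List.foldl_cons, hreq, List.isEmpty_cons, Bool.false_eq_true, if_false]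
      rw [← hstep]
      exact ih (pvRemoveAll t m) hnerest hshape1

-- ===== VERDICT (by name: the statement is the Claim_ definition above) =====
theorem solution_spec : Claim_equal_solution := by
  unfold Claim_equal_solution
  intro storage requests hdom hpre
  unfold Spec_solution
  obtain ⟨hnone, hrectimp⟩ := hpre
  rcases requests with _ | ⟨req0, reqrest⟩
  · simp only [solution, solution_alt, List.foldl_nil]
    exact pvSum_eq _
  have hrect := hrectimp (by simp)
  simp only [solution, solution_alt]
  have hshape0 : PvShape (storage.map (fun row => row.toList.map (fun c => some c)))
      ((storage.map (fun row => row.toList.map (fun c => some c))).length)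
      (((storage.map (fun row => row.toList.map (fun c => some c))).getD 0 []).length) := by
    refine ⟨rfl, ?_⟩
    intro r hr
    simp only [List.mem_map] at hr
    obtain ⟨srow, hsrow, rfl⟩ := hr
    rcases storage with _ | ⟨s0, ss⟩
    · simp at hsrow
    · have h1 := hrect srow hsrow
      have h2 := hrect s0 (by simp)
      simp only [List.headD_cons] at h1 h2
      simp [h1, h2]
  have hw0 : (storage.map (fun row => row.toList.map (fun c => some c))).length = 0 →
      (((storage.map (fun row => row.toList.map (fun c => some c))).getD 0 []).length) = 0 := by
    intro hz
    have : (storage.map (fun row => row.toList.map (fun c => some c))) = [] :=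
      List.length_eq_zero_iff.mp hz
    rw [this]
    rfl
  have hfold := pvFoldReq_eq _ _ hw0 (req0 :: reqrest)
    (storage.map (fun row => row.toList.map (fun c => some c)))
    (fun r hr => hnone r hr) hshape0
  rw [pvSum_eq, hfold]
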